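-- pv_equiv track=rewrite | github.com/EduardoSA8006/authentication-service | app/features/auth/validators.py | _capitalize_word
-- ===== SOURCE A (Python) =====
-- def _capitalize_word(word: str) -> str:
--     if "-" in word:
--         return "-".join(_capitalize_word(p) for p in word.split("-"))
--     if "'" in word:
--         parts = word.split("'")
--         return "'".join(
--             p[0].upper() + p[1:].lower() if p else "" for p in parts
--         )
--     return word[0].upper() + word[1:].lower() if word else word
-- ===== SOURCE B (Python) =====
-- def _capitalize_word(word: str) -> str:
--     out = []
--     start = True
--     for ch in word:
--         if ch == "-" or ch == "'":
--             out.append(ch)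
--             start = True
--         else:
--             out.append(ch.upper() if start else ch.lower())
--             start = False
--     return "".join(out)
-- ===== Notes on version B (the rewrite author's own statement) =====
-- stated objective: simpler
-- what changed: Replaced A's recursive hyphen/apostrophe split-and-join by a single left-to-right character scan that carries a start-of-segment flag.
import Mathlib
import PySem

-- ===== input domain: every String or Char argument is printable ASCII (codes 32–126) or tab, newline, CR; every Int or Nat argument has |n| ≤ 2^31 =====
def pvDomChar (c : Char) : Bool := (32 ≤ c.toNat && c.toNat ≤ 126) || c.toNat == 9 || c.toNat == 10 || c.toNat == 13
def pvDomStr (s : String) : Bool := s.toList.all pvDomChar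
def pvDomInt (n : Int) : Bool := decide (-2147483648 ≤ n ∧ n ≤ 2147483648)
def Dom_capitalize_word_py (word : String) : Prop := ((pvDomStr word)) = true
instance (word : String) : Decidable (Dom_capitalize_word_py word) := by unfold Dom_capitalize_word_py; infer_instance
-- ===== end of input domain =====

-- B replaces A's recursive hyphen/apostrophe split-and-join by a single left-to-right character
-- scan carrying a start-of-segment flag (objective: simpler one-pass decomposition).

-- ===== PORT A =====
-- p[0].upper() + p[1:].lower()  (used only on nonempty p)
def pvCapFirst (p : List Char) : List Char :=
  PySem.Chars.upperChar p.headI :: PySem.Chars.lower (PySem.List.slice p (some 1) none)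

-- literal port of A; the Nat fuel only makes the recursion total (the '-' branch recurses on
-- split parts, which contain no '-', so depth ≤ 2 and the fuel is never exhausted)
def capA : Nat → List Char → List Char
  | 0, cs => cs
  | _fuel+1, cs =>
    if PySem.Chars.isIn ['-'] cs then
      PySem.Chars.join ['-'] ((PySem.Chars.splitOn cs ['-']).map (capA _fuel))
    else if PySem.Chars.isIn ['\''] cs then
      PySem.Chars.join ['\''] ((PySem.Chars.splitOn cs ['\'']).map
        (fun p => if p ≠ [] then pvCapFirst p else []))
    else if cs ≠ [] then pvCapFirst cs else cs

def capitalize_word_py (word : String) : String :=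
  String.ofList (capA (word.toList.length + 1) word.toList)

-- ===== PORT B =====
-- one pass: out-list accumulator + start-of-segment flag, then "".join(out)
def capitalize_word_py_alt (word : String) : String :=
  let st := word.toList.foldl
    (fun (st : List Char × Bool) ch =>
      if ch = '-' ∨ ch = '\'' then (st.1 ++ [ch], true)
      else (st.1 ++ [if st.2 then PySem.Chars.upperChar ch else PySem.Chars.lowerChar ch], false))
    ([], true)
  String.ofList st.1

-- ===== PRECONDITION & SPEC =====
def Spec_capitalize_word_py (word : String) (out : String) : Prop := out = capitalize_word_py_alt word
instance (word : String) (out : String) : Decidable (Spec_capitalize_word_py word out) := by unfold Spec_capitalize_word_py; infer_instance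

-- ===== CLAIM (what is proved, stated in full; the proofs are below) =====
def Claim_equal_capitalize_word_py : Prop := ∀ (word : String), Dom_capitalize_word_py word → Spec_capitalize_word_py word (capitalize_word_py word)

-- ===== LEMMAS AND PROOFS =====

-- the scan B performs, as a structural recursion (proof-side view of B's foldl)
def pvScan : Bool → List Char → List Char
  | _, [] => []
  | flag, c :: rest =>
    if c = '-' ∨ c = '\'' then c :: pvScan true rest
    else (if flag then PySem.Chars.upperChar c else PySem.Chars.lowerChar c) :: pvScan false rest

theorem pvFoldl_eq_scan (cs : List Char) (out : List Char) (flag : Bool) :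
    (cs.foldl
      (fun (st : List Char × Bool) ch =>
        if ch = '-' ∨ ch = '\'' then (st.1 ++ [ch], true)
        else (st.1 ++ [if st.2 then PySem.Chars.upperChar ch else PySem.Chars.lowerChar ch], false))
      (out, flag)).1 = out ++ pvScan flag cs := by
  induction cs generalizing out flag with
  | nil => simp [pvScan]
  | cons c rest ih =>
    by_cases h : c = '-' ∨ c = '\'' <;> simp [pvScan, h, ih, List.foldl_cons]

theorem alt_eq_scan (word : String) :
    capitalize_word_py_alt word = String.ofList (pvScan true word.toList) := by
  unfold capitalize_word_py_alt
  rw [show (([] : List Char), true) = (([] : List Char), true) from rfl]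
  simp [pvFoldl_eq_scan word.toList [] true]

-- ---- a clean splitter equal to PySem.Chars.splitOn for a single-char separator ----
def pvPrepC (c : Char) : List (List Char) → List (List Char)
  | [] => [[c]]
  | p :: ps => (c :: p) :: ps

def pvSplitC (d : Char) : List Char → List (List Char)
  | [] => [[]]
  | c :: rest => if c = d then [] :: pvSplitC d rest else pvPrepC c (pvSplitC d rest)

def pvPrepL (x : List Char) : List (List Char) → List (List Char)
  | [] => [x]
  | p :: ps => (x ++ p) :: ps

theorem pvSplitC_ne_nil (d : Char) (cs : List Char) : pvSplitC d cs ≠ [] := by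
  cases cs with
  | nil => simp [pvSplitC]
  | cons c rest =>
    simp only [pvSplitC]
    split
    · simp
    · cases h : pvSplitC d rest <;> simp [pvPrepC]

theorem pvPrepL_nil {ps : List (List Char)} (h : ps ≠ []) : pvPrepL [] ps = ps := by
  cases ps with
  | nil => exact absurd rfl h
  | cons p ps => simp [pvPrepL]

theorem pvPrepL_prepC (x : List Char) (c : Char) (ps : List (List Char)) :
    pvPrepL x (pvPrepC c ps) = pvPrepL (x ++ [c]) ps := by
  cases ps <;> simp [pvPrepL, pvPrepC]

theorem pvSplitOn_go (d : Char) (cs : List Char) :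
    ∀ (fuel : Nat) (cur : List Char) (acc : List (List Char)), cs.length ≤ fuel →
      PySem.Chars.splitOn.go [d] fuel cs cur acc
        = acc.reverse ++ pvPrepL cur.reverse (pvSplitC d cs) := by
  induction cs with
  | nil =>
    intro fuel cur acc _
    cases fuel <;> simp [PySem.Chars.splitOn.go, pvSplitC, pvPrepL]
  | cons c rest ih =>
    intro fuel cur acc hf
    cases fuel with
    | zero => simp at hf
    | succ f =>
      rw [PySem.Chars.splitOn.go]
      by_cases h : c = d
      · subst h
        have hpre : List.isPrefixOf [c] (c :: rest) = true := by
          simp [List.isPrefixOf]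
        simp only [hpre]
        rw [if_pos trivial]
        simp only [List.length_cons, List.length_nil, Nat.zero_add, List.drop_succ_cons, List.drop_zero]
        rw [ih f [] (cur.reverse :: acc) (by simpa using Nat.le_of_succ_le_succ hf)]
        simp only [pvSplitC, List.reverse_cons, List.append_assoc, List.reverse_nil, pvPrepL, List.cons_append, List.nil_append]
        cases hs : pvSplitC c rest with
        | nil => exact absurd hs (pvSplitC_ne_nil c rest)
        | cons p ps => simp
      · have hpre : List.isPrefixOf [d] (c :: rest) = false := by
          simp [List.isPrefixOf]
          exact fun hh => absurd hh.symm h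
        simp only [hpre, Bool.false_eq_true, if_false]
        rw [ih f (c :: cur) acc (by simpa using Nat.le_of_succ_le_succ hf)]
        simp [pvSplitC, h, pvPrepL_prepC]

theorem pvSplitOn_single (d : Char) (cs : List Char) :
    PySem.Chars.splitOn cs [d] = pvSplitC d cs := by
  unfold PySem.Chars.splitOn
  rw [pvSplitOn_go d cs (cs.length + 1) [] [] (by omega)]
  simp [pvPrepL_nil (pvSplitC_ne_nil d cs)]

theorem pvIsIn_single (d : Char) (cs : List Char) :
    PySem.Chars.isIn [d] cs = cs.contains d := by
  by_cases h : d ∈ cs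
  · have : [d] <:+: cs := by
      obtain ⟨s, t, rfl⟩ := List.append_of_mem h
      exact ⟨s, t, by simp⟩
    simp [h, (PySem.Chars.isIn_iff_infix [d] cs).2 this]
  · have : ¬ [d] <:+: cs := fun hin => h (hin.subset (by simp))
    have hb : PySem.Chars.isIn [d] cs = false := by
      cases hh : PySem.Chars.isIn [d] cs
      · rfl
      · exact absurd ((PySem.Chars.isIn_iff_infix [d] cs).1 hh) this
    simp [hb, h]

theorem pvJoin_splitC (d : Char) (cs : List Char) :
    PySem.Chars.join [d] (pvSplitC d cs) = cs := by
  induction cs with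
  | nil => simp [pvSplitC, PySem.Chars.join_singleton]
  | cons c rest ih =>
    simp only [pvSplitC]
    obtain ⟨q, qs, hq⟩ : ∃ q qs, pvSplitC d rest = q :: qs := by
      cases h : pvSplitC d rest with
      | nil => exact absurd h (pvSplitC_ne_nil d rest)
      | cons q qs => exact ⟨q, qs, rfl⟩
    by_cases h : c = d
    · subst h
      rw [if_pos rfl, hq, PySem.Chars.join_cons_cons]
      rw [hq] at ih; simp [ih]
    · rw [if_neg h, hq, pvPrepC]
      rw [hq] at ih
      cases qs with
      | nil => simp [PySem.Chars.join_singleton] at ih ⊢; exact ih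
      | cons q' qs' =>
        rw [PySem.Chars.join_cons_cons] at ih ⊢
        simpa using ih

theorem pvSplitC_subset (d : Char) (cs : List Char) :
    ∀ q ∈ pvSplitC d cs, ∀ c ∈ q, c ∈ cs := by
  induction cs with
  | nil => intro q hq c hc; simp [pvSplitC] at hq; simp [hq] at hc
  | cons a rest ih =>
    intro q hq c hc
    simp only [pvSplitC] at hq
    by_cases h : a = d
    · rw [if_pos h] at hq
      rcases List.mem_cons.1 hq with h1 | h1
      · simp [h1] at hc
      · exact List.mem_cons_of_mem _ (ih q h1 c hc)
    · rw [if_neg h] at hq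
      obtain ⟨p, ps, hp⟩ : ∃ p ps, pvSplitC d rest = p :: ps := by
        cases hh : pvSplitC d rest with
        | nil => exact absurd hh (pvSplitC_ne_nil d rest)
        | cons p ps => exact ⟨p, ps, rfl⟩
      rw [hp, pvPrepC] at hq
      rcases List.mem_cons.1 hq with h1 | h1
      · subst h1
        rcases List.mem_cons.1 hc with h2 | h2
        · simp [h2]
        · exact List.mem_cons_of_mem _ (ih p (by simp [hp]) c h2)
      · exact List.mem_cons_of_mem _ (ih q (by simp [hp, h1]) c hc)

theorem pvSplitC_free (d : Char) (cs : List Char) :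
    ∀ q ∈ pvSplitC d cs, d ∉ q := by
  induction cs with
  | nil => intro q hq; simp [pvSplitC] at hq; simp [hq]
  | cons a rest ih =>
    intro q hq
    simp only [pvSplitC] at hq
    by_cases h : a = d
    · rw [if_pos h] at hq
      rcases List.mem_cons.1 hq with h1 | h1
      · simp [h1]
      · exact ih q h1
    · rw [if_neg h] at hq
      obtain ⟨p, ps, hp⟩ : ∃ p ps, pvSplitC d rest = p :: ps := by
        cases hh : pvSplitC d rest with
        | nil => exact absurd hh (pvSplitC_ne_nil d rest)
        | cons p ps => exact ⟨p, ps, rfl⟩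
      rw [hp, pvPrepC] at hq
      rcases List.mem_cons.1 hq with h1 | h1
      · subst h1
        intro hd
        rcases List.mem_cons.1 hd with h2 | h2
        · exact h h2.symm
        · exact ih p (by simp [hp]) h2
      · exact ih q (by simp [hp, h1])

-- ---- scan lemmas ----
theorem pvScan_append_delim (d : Char) (hd : d = '-' ∨ d = '\'')
    (xs ys : List Char) (flag : Bool) :
    pvScan flag (xs ++ d :: ys) = pvScan flag xs ++ d :: pvScan true ys := by
  induction xs generalizing flag with
  | nil => simp [pvScan, hd]
  | cons c rest ih =>
    by_cases h : c = '-' ∨ c = '\'' <;> simp [pvScan, h, ih]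

theorem pvScan_join (d : Char) (hd : d = '-' ∨ d = '\'') (parts : List (List Char)) :
    pvScan true (PySem.Chars.join [d] parts)
      = PySem.Chars.join [d] (parts.map (pvScan true)) := by
  induction parts with
  | nil => simp [PySem.Chars.join_nil, pvScan]
  | cons p ps ih =>
    cases ps with
    | nil => simp [PySem.Chars.join_singleton]
    | cons q qs =>
      simp only [List.map_cons]
      rw [PySem.Chars.join_cons_cons, PySem.Chars.join_cons_cons]
      have : p ++ [d] ++ PySem.Chars.join [d] (q :: qs)
          = p ++ d :: PySem.Chars.join [d] (q :: qs) := by simp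
      rw [this, pvScan_append_delim d hd, ih]
      simp

theorem pvScan_false_free (cs : List Char)
    (h : ∀ c ∈ cs, ¬ (c = '-' ∨ c = '\'')) :
    pvScan false cs = PySem.Chars.lower cs := by
  induction cs with
  | nil => simp [pvScan, PySem.Chars.lower]
  | cons c rest ih =>
    have hc := h c (by simp)
    simp [pvScan, hc, PySem.Chars.lower, ih (fun x hx => h x (by simp [hx]))]

theorem pvScan_true_free (cs : List Char)
    (h : ∀ c ∈ cs, ¬ (c = '-' ∨ c = '\'')) :
    pvScan true cs = if cs ≠ [] then pvCapFirst cs else cs := by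
  cases cs with
  | nil => simp [pvScan]
  | cons c rest =>
    have hc := h c (by simp)
    simp only [pvScan, hc, if_false, ne_eq, reduceCtorEq, not_false_eq_true, if_true]
    rw [pvScan_false_free rest (fun x hx => h x (by simp [hx]))]
    unfold pvCapFirst
    rw [PySem.List.slice_from _ (by norm_num)]
    simp

-- capA on a hyphen-free word, any positive fuel
theorem capA_nohyphen (p : List Char) (h : '-' ∉ p) (f : Nat) :
    capA (f + 1) p = pvScan true p := by
  have hh : PySem.Chars.isIn ['-'] p = false := by
    rw [pvIsIn_single]; simpa using h
  simp only [capA, hh, Bool.false_eq_true, if_false]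
  by_cases ha : '\'' ∈ p
  · have ha' : PySem.Chars.isIn ['\''] p = true := by
      rw [pvIsIn_single]; simpa using ha
    rw [ha', if_pos rfl, pvSplitOn_single]
    conv_rhs => rw [← pvJoin_splitC '\'' p]
    rw [pvScan_join '\'' (Or.inr rfl)]
    congr 1
    apply List.map_congr_left
    intro q hq
    have hfree : ∀ c ∈ q, ¬ (c = '-' ∨ c = '\'') := by
      intro c hc
      rintro (rfl | rfl)
      · exact h (pvSplitC_subset '\'' p q hq _ hc)
      · exact pvSplitC_free '\'' p q hq hc
    rw [pvScan_true_free q hfree]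
    by_cases hq0 : q = [] <;> simp [hq0]
  · have ha' : PySem.Chars.isIn ['\''] p = false := by
      rw [pvIsIn_single]; simpa using ha
    rw [ha', if_neg (by simp)]
    have hfree : ∀ c ∈ p, ¬ (c = '-' ∨ c = '\'') := by
      intro c hc
      rintro (rfl | rfl)
      · exact h hc
      · exact ha hc
    rw [pvScan_true_free p hfree]

theorem capA_eq_scan (cs : List Char) : capA (cs.length + 1) cs = pvScan true cs := by
  by_cases h : '-' ∈ cs
  · have hh : PySem.Chars.isIn ['-'] cs = true := by
      rw [pvIsIn_single]; simpa using h
    simp only [capA, hh]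
    rw [if_pos trivial, pvSplitOn_single]
    conv_rhs => rw [← pvJoin_splitC '-' cs]
    rw [pvScan_join '-' (Or.inl rfl)]
    congr 1
    apply List.map_congr_left
    intro q hq
    obtain ⟨m, hm⟩ : ∃ m, cs.length = m + 1 := by
      cases cs with
      | nil => simp at h
      | cons a t => exact ⟨t.length, by simp⟩
    rw [hm]
    exact capA_nohyphen q (fun hc => pvSplitC_free '-' cs q hq hc) m
  · exact capA_nohyphen cs h _

-- ===== VERDICT (by name: the statement is the Claim_ definition above) =====
theorem capitalize_word_py_spec : Claim_equal_capitalize_word_py := by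
  intro word _
  unfold Spec_capitalize_word_py
  rw [alt_eq_scan]
  unfold capitalize_word_py
  rw [capA_eq_scan]
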